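-- pv_equiv track=rewrite | github.com/doubc/The_Theory_of_Difference | scripts/实现改版clem_morse_原始大文件.py | find_sphere_triangulation
-- ===== SOURCE A (Python) =====
-- def apply_triangular_faces(directed_edges, vertices):
--     """
--     识别三角形面：三个顶点两两之间都有边（有向或反向）。
--
--     返回三角形面列表，每个面是三个顶点的元组，
--     按标准定向（逆时针）排列。
--     """
--     # 构造无向邻接集合
--     undirected = set()
--     for e in directed_edges:
--         src, tgt = e
--         undirected.add(frozenset([src, tgt]))
--
--     e_idx = {e: i for i, e in enumerate(directed_edges)}
--
--     triangles = []
--     vl = list(vertices)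
--     n = len(vl)
--
--     for i in range(n):
--         for j in range(i + 1, n):
--             for k in range(j + 1, n):
--                 vi, vj, vk = vl[i], vl[j], vl[k]
--                 # 检查三条边是否都存在
--                 if (frozenset([vi, vj]) in undirected and
--                         frozenset([vj, vk]) in undirected and
--                         frozenset([vi, vk]) in undirected):
--                     triangles.append((vi, vj, vk))
--
--     return triangles
--
-- def find_sphere_triangulation(directed_edges, vertices):
--     """
--     在图的三角面中，找一个满足流形条件的子集：
--     每条无向边恰好属于 2 个三角面。
--
--     这等价于找图的一个球面三角剖分（如果存在）。
--
--     策略：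
--     1. 找出所有三角面
--     2. 用贪心算法选取三角面子集，
--        使得每条边最多被 2 个面使用
--     3. 检验结果的同调群
--     """
--     all_tris = apply_triangular_faces(directed_edges, sorted(vertices))
--
--     # 统计每条无向边被多少个三角面包含
--     from collections import defaultdict
--     edge_to_tris = defaultdict(list)
--     for k, tri in enumerate(all_tris):
--         v0, v1, v2 = tri
--         for ei, ej in [(v0, v1), (v1, v2), (v0, v2)]:
--             edge_to_tris[frozenset([ei, ej])].append(k)
--
--     # 贪心选取：每条边最多被 2 个面选中
--     selected = set()
--     edge_count = defaultdict(int)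
--
--     # 按"边的竞争度"排序：竞争越少的三角面优先选
--     def face_score(k):
--         tri = all_tris[k]
--         v0, v1, v2 = tri
--         total = 0
--         for ei, ej in [(v0, v1), (v1, v2), (v0, v2)]:
--             total += len(edge_to_tris[frozenset([ei, ej])])
--         return total
--
--     sorted_tris = sorted(range(len(all_tris)), key=face_score)
--
--     for k in sorted_tris:
--         tri = all_tris[k]
--         v0, v1, v2 = tri
--         # 检查这个面的三条边是否都还有空位
--         ok = True
--         for ei, ej in [(v0, v1), (v1, v2), (v0, v2)]:
--             if edge_count[frozenset([ei, ej])] >= 2: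
--                 ok = False
--                 break
--         if ok:
--             selected.add(k)
--             for ei, ej in [(v0, v1), (v1, v2), (v0, v2)]:
--                 edge_count[frozenset([ei, ej])] += 1
--
--     selected_tris = [all_tris[k] for k in sorted(selected)]
--
--     # 检验流形条件
--     edge_counts = list(edge_count.values())
--     from collections import Counter
--     count_dist = Counter(edge_counts)
--
--     return selected_tris, count_dist
-- ===== SOURCE B (Python) =====
-- def find_sphere_triangulation(directed_edges, vertices):
--     """Faster re-implementation: triangles are enumerated per adjacent position
--     pair via neighbour-set intersection instead of a triple loop over all
--     vertex triples; edge 'competition' is kept as a count instead of index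
--     lists; the greedy selection and the final count distribution are produced
--     with plain dicts/lists."""
--     svl = sorted(vertices)
--     n = len(svl)
--
--     # value adjacency (undirected, self-loops kept)
--     adjv = {}
--     for s, t in directed_edges:
--         adjv.setdefault(s, set()).add(t)
--         adjv.setdefault(t, set()).add(s)
--
--     # positions of each value in the sorted vertex list
--     pos_of = {}
--     for i, v in enumerate(svl):
--         pos_of.setdefault(v, []).append(i)
--
--     # for each position, the set of positions holding an adjacent value
--     pos_adj = []
--     for v in svl:
--         nbrs = set()
--         for w in adjv.get(v, ()):
--             nbrs.update(pos_of.get(w, []))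
--         pos_adj.append(nbrs)
--
--     # triangles via neighbour-set intersection, in ascending position order
--     tris = []
--     for i in range(n):
--         ai = pos_adj[i]
--         for j in sorted(ai):
--             if j > i:
--                 common = ai & pos_adj[j]
--                 for k in sorted(common):
--                     if k > j:
--                         tris.append((svl[i], svl[j], svl[k]))
--
--     def nrm(a, b):
--         return (a, b) if a <= b else (b, a)
--
--     # how many triangles use each undirected edge
--     edge_deg = {}
--     for v0, v1, v2 in tris:
--         for e in (nrm(v0, v1), nrm(v1, v2), nrm(v0, v2)):
--             edge_deg[e] = edge_deg.get(e, 0) + 1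
--
--     order = sorted(range(len(tris)),
--                    key=lambda q: sum(edge_deg[e] for e in
--                                      (nrm(tris[q][0], tris[q][1]),
--                                       nrm(tris[q][1], tris[q][2]),
--                                       nrm(tris[q][0], tris[q][2]))))
--
--     # greedy: each edge used by at most two selected faces
--     edge_count = {}
--     selected = []
--     for q in order:
--         v0, v1, v2 = tris[q]
--         es = (nrm(v0, v1), nrm(v1, v2), nrm(v0, v2))
--         ok = True
--         for e in es:
--             if edge_count.setdefault(e, 0) >= 2:
--                 ok = False
--                 break
--         if ok:
--             selected.append(q)
--             for e in es:
--                 edge_count[e] += 1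
--
--     selected_tris = [tris[q] for q in sorted(selected)]
--
--     dist = {}
--     for c in edge_count.values():
--         dist[c] = dist.get(c, 0) + 1
--     return selected_tris, dist
-- ===== Notes on version B (the rewrite author's own statement) =====
-- stated objective: faster
-- what changed: Triangles are enumerated by intersecting per-position neighbour sets over actual edges (skipping non-adjacent vertex pairs entirely) instead of testing all O(n^3) vertex triples, and per-edge competition is kept as integer counts instead of index lists; greedy selection and the count distribution use plain dicts/lists.
import Mathlib
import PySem

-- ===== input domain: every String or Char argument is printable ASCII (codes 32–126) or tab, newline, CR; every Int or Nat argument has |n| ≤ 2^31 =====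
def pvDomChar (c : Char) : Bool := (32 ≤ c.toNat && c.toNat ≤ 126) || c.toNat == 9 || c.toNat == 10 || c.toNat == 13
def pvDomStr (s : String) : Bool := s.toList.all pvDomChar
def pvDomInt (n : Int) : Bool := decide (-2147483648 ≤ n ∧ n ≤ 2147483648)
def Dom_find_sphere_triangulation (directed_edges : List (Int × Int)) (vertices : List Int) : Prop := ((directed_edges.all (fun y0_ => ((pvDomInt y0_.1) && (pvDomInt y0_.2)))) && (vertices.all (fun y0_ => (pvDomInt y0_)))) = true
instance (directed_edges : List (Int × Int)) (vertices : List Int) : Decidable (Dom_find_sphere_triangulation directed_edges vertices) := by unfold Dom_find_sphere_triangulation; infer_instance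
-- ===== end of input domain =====

-- B replaces A's O(n^3) triple loop over all vertex triples by per-position
-- neighbour-set intersection over actual edges, and keeps per-edge counts
-- instead of per-edge index lists (objective: faster; measured).

-- frozenset([a, b]) of two ints is represented exactly by its canonical
-- ordered pair (min, max): frozensets are equal iff these pairs are equal.
def pvNorm (a b : Int) : Int × Int := if a ≤ b then (a, b) else (b, a)

-- the three undirected edges [(v0,v1), (v1,v2), (v0,v2)] of a triangle,
-- built identically by both Pythons
def pvTriEdges (t : Int × Int × Int) : List (Int × Int) :=
  [pvNorm t.1 t.2.1, pvNorm t.2.1 t.2.2, pvNorm t.1 t.2.2]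

-- one read of a (defaultdict(int)-like) entry: the value (default 0) plus the
-- dict after the read has inserted the default for a missing key — exactly
-- A's `edge_count[e]` on a defaultdict and B's `edge_count.setdefault(e, 0)`
def pvDDRead (d : PySem.Dict (Int × Int) Int) (e : Int × Int) :
    Int × PySem.Dict (Int × Int) Int :=
  (d.getD e 0, d.setdefault e 0)

-- `for e in es: if edge_count[e] >= 2: ok = False; break` — identical loop in
-- both Pythons (the `if okd.1 = false` branch is the `break`)
def pvOkCheck (d : PySem.Dict (Int × Int) Int) (es : List (Int × Int)) :
    Bool × PySem.Dict (Int × Int) Int :=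
  es.foldl (fun okd e =>
    if okd.1 = false then okd
    else
      if (pvDDRead okd.2 e).1 ≥ 2 then (false, (pvDDRead okd.2 e).2)
      else (true, (pvDDRead okd.2 e).2)) (true, d)

-- ===== PORT A =====
def pvUndirected (directed_edges : List (Int × Int)) : PySem.Set (Int × Int) :=
  directed_edges.foldl (fun s e => s.add (pvNorm e.1 e.2)) PySem.Set.empty

def apply_triangular_faces (directed_edges : List (Int × Int)) (vertices : List Int) :
    List (Int × Int × Int) :=
  let undirected := pvUndirected directed_edges
  -- e_idx is built by A but never used afterwards
  let _e_idx : PySem.Dict (Int × Int) Int :=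
    (PySem.List.enumerate directed_edges).foldl (fun d p => d.insert p.2 p.1) PySem.Dict.empty
  let vl := vertices
  let n : Int := (vl.length : Int)
  (PySem.List.pyRange 0 n).foldl (fun tris i =>
    (PySem.List.pyRange (i + 1) n).foldl (fun tris j =>
      (PySem.List.pyRange (j + 1) n).foldl (fun tris k =>
        let vi := PySem.List.pyGetD vl i 0
        let vj := PySem.List.pyGetD vl j 0
        let vk := PySem.List.pyGetD vl k 0
        if undirected.contains (pvNorm vi vj) && undirected.contains (pvNorm vj vk) &&
            undirected.contains (pvNorm vi vk) then
          tris ++ [(vi, vj, vk)]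
        else tris) tris) tris) []

def pvEdgeToTris (tris : List (Int × Int × Int)) : PySem.Dict (Int × Int) (List Int) :=
  (PySem.List.enumerate tris).foldl (fun d p =>
    (pvTriEdges p.2).foldl (fun d e => d.modify e [] (fun l => l ++ [p.1])) d)
    PySem.Dict.empty

-- face_score reads only keys the build loop has inserted, so its defaultdict
-- reads never change edge_to_tris: a pure getD is value-exact here
def pvFaceScore (d : PySem.Dict (Int × Int) (List Int)) (tris : List (Int × Int × Int))
    (k : Int) : Int :=
  let t := PySem.List.pyGetD tris k (0, 0, 0)
  (pvTriEdges t).foldl (fun total e => total + ((d.getD e []).length : Int)) 0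

def pvStepA (tris : List (Int × Int × Int))
    (st : PySem.Set Int × PySem.Dict (Int × Int) Int) (k : Int) :
    PySem.Set Int × PySem.Dict (Int × Int) Int :=
  let t := PySem.List.pyGetD tris k (0, 0, 0)
  let okd := pvOkCheck st.2 (pvTriEdges t)
  if okd.1 then
    (st.1.add k, (pvTriEdges t).foldl (fun d e => d.modify e 0 (· + 1)) okd.2)
  else (st.1, okd.2)

def find_sphere_triangulation (directed_edges : List (Int × Int)) (vertices : List Int) :
    (List (Int × Int × Int)) × (List (Int × Int)) :=
  let all_tris := apply_triangular_faces directed_edges (PySem.List.sorted vertices (fun x => x))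
  let edge_to_tris := pvEdgeToTris all_tris
  let sorted_tris := PySem.List.sorted (PySem.List.pyRange 0 (all_tris.length : Int))
    (pvFaceScore edge_to_tris all_tris)
  let st := sorted_tris.foldl (pvStepA all_tris) (PySem.Set.empty, PySem.Dict.empty)
  let selected_tris := (PySem.List.sorted st.1 (fun x => x)).map
    (fun k => PySem.List.pyGetD all_tris k (0, 0, 0))
  let edge_counts := st.2.values
  (selected_tris, (PySem.Dict.counter edge_counts).items)

-- ===== PORT B =====
def pvAdjv (directed_edges : List (Int × Int)) : PySem.Dict Int (PySem.Set Int) :=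
  directed_edges.foldl (fun d e =>
    (d.modify e.1 PySem.Set.empty (fun s => s.add e.2)).modify e.2 PySem.Set.empty
      (fun s => s.add e.1)) PySem.Dict.empty

def pvPosOf (svl : List Int) : PySem.Dict Int (List Int) :=
  (PySem.List.enumerate svl).foldl (fun d p => d.modify p.2 [] (fun l => l ++ [p.1]))
    PySem.Dict.empty

def pvPosAdj (directed_edges : List (Int × Int)) (svl : List Int) : List (PySem.Set Int) :=
  svl.map (fun v =>
    ((pvAdjv directed_edges).getD v PySem.Set.empty).foldl
      (fun nbrs w => nbrs.update ((pvPosOf svl).getD w [])) PySem.Set.empty)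

def pvTrisB (directed_edges : List (Int × Int)) (svl : List Int) : List (Int × Int × Int) :=
  let pos_adj := pvPosAdj directed_edges svl
  let n : Int := (svl.length : Int)
  (PySem.List.pyRange 0 n).foldl (fun tris i =>
    let ai := PySem.List.pyGetD pos_adj i PySem.Set.empty
    (PySem.List.sorted ai (fun x => x)).foldl (fun tris j =>
      if j > i then
        let common := ai.inter (PySem.List.pyGetD pos_adj j PySem.Set.empty)
        (PySem.List.sorted common (fun x => x)).foldl (fun tris k =>
          if k > j then
            tris ++ [(PySem.List.pyGetD svl i 0, PySem.List.pyGetD svl j 0,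
              PySem.List.pyGetD svl k 0)]
          else tris) tris
      else tris) tris) []

def pvEdgeDeg (tris : List (Int × Int × Int)) : PySem.Dict (Int × Int) Int :=
  tris.foldl (fun d t => (pvTriEdges t).foldl (fun d e => d.modify e 0 (· + 1)) d)
    PySem.Dict.empty

def pvScoreB (d : PySem.Dict (Int × Int) Int) (tris : List (Int × Int × Int)) (q : Int) : Int :=
  ((pvTriEdges (PySem.List.pyGetD tris q (0, 0, 0))).map (fun e => d.getD e 0)).sum

def pvStepB (tris : List (Int × Int × Int))
    (st : List Int × PySem.Dict (Int × Int) Int) (q : Int) :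
    List Int × PySem.Dict (Int × Int) Int :=
  let t := PySem.List.pyGetD tris q (0, 0, 0)
  let okd := pvOkCheck st.2 (pvTriEdges t)
  if okd.1 then
    (st.1 ++ [q], (pvTriEdges t).foldl (fun d e => d.modify e 0 (· + 1)) okd.2)
  else (st.1, okd.2)

def find_sphere_triangulation_alt (directed_edges : List (Int × Int)) (vertices : List Int) :
    (List (Int × Int × Int)) × (List (Int × Int)) :=
  let svl := PySem.List.sorted vertices (fun x => x)
  let tris := pvTrisB directed_edges svl
  let edge_deg := pvEdgeDeg tris
  let order := PySem.List.sorted (PySem.List.pyRange 0 (tris.length : Int))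
    (pvScoreB edge_deg tris)
  let st := order.foldl (pvStepB tris) ([], PySem.Dict.empty)
  let selected_tris := (PySem.List.sorted st.1 (fun x => x)).map
    (fun q => PySem.List.pyGetD tris q (0, 0, 0))
  let dist := st.2.values.foldl (fun d c => d.insert c (d.getD c 0 + 1)) PySem.Dict.empty
  (selected_tris, dist.items)

-- ===== PRECONDITION & SPEC =====
def Spec_find_sphere_triangulation (directed_edges : List (Int × Int)) (vertices : List Int) (out : (List (Int × Int × Int)) × (List (Int × Int))) : Prop := out = find_sphere_triangulation_alt directed_edges vertices
instance (directed_edges : List (Int × Int)) (vertices : List Int) (out : (List (Int × Int × Int)) × (List (Int × Int))) : Decidable (Spec_find_sphere_triangulation directed_edges vertices out) := by unfold Spec_find_sphere_triangulation; infer_instance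

-- ===== CLAIM (what is proved, stated in full; the proofs are below) =====
def Claim_equal_find_sphere_triangulation : Prop := ∀ (directed_edges : List (Int × Int)) (vertices : List Int), Dom_find_sphere_triangulation directed_edges vertices → Spec_find_sphere_triangulation directed_edges vertices (find_sphere_triangulation directed_edges vertices)

-- ===== LEMMAS AND PROOFS =====

lemma pvNorm_eq_iff (a b c d : Int) :
    pvNorm a b = pvNorm c d ↔ (a = c ∧ b = d) ∨ (a = d ∧ b = c) := by
  unfold pvNorm; split_ifs <;> simp [Prod.ext_iff] <;> omega

lemma pvNorm_comm (a b : Int) : pvNorm a b = pvNorm b a := by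
  unfold pvNorm; split_ifs <;> simp [Prod.ext_iff] <;> omega

lemma mem_pvUndirected (de : List (Int × Int)) (x : Int × Int) :
    x ∈ pvUndirected de ↔ ∃ e ∈ de, pvNorm e.1 e.2 = x := by
  have h : pvUndirected de = PySem.Set.ofList (de.map (fun e => pvNorm e.1 e.2)) := by
    unfold pvUndirected
    rw [PySem.Set.ofList_eq_foldl, List.foldl_map]
    rfl
  rw [h, PySem.Set.mem_ofList, List.mem_map]

lemma getD_modify2_mem (a1 a2 v w : Int) (d : PySem.Dict Int (PySem.Set Int)) :
    w ∈ ((d.modify a1 PySem.Set.empty (fun s => s.add a2)).modify a2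
        PySem.Set.empty (fun s => s.add a1)).getD v PySem.Set.empty ↔
      w ∈ d.getD v PySem.Set.empty ∨ (a1 = v ∧ a2 = w) ∨ (a2 = v ∧ a1 = w) := by
  simp only [PySem.Dict.getD_modify]
  by_cases h1 : v = a2
  · by_cases h3 : a2 = a1
    · rw [h1, h3, if_pos rfl, if_pos rfl]
      simp only [PySem.Set.mem_add]
      constructor
      · rintro ((h | h) | h)
        · exact Or.inl h
        · exact Or.inr (Or.inl ⟨by trivial, h.symm⟩)
        · exact Or.inr (Or.inl ⟨by trivial, h.symm⟩)
      · rintro (h | ⟨-, h⟩ | ⟨-, h⟩)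
        · exact Or.inl (Or.inl h)
        · exact Or.inl (Or.inr h.symm)
        · exact Or.inl (Or.inr h.symm)
    · rw [h1, if_pos rfl, if_neg h3]
      simp only [PySem.Set.mem_add]
      constructor
      · rintro (h | h)
        · exact Or.inl h
        · exact Or.inr (Or.inr ⟨by trivial, h.symm⟩)
      · rintro (h | ⟨he, hw⟩ | ⟨-, hw⟩)
        · exact Or.inl h
        · exact absurd he.symm h3
        · exact Or.inr hw.symm
  · rw [if_neg h1]
    by_cases h2 : v = a1
    · rw [h2, if_pos rfl]
      simp only [PySem.Set.mem_add]
      constructor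
      · rintro (h | h)
        · exact Or.inl h
        · exact Or.inr (Or.inl ⟨by trivial, h.symm⟩)
      · rintro (h | ⟨-, hw⟩ | ⟨he, hw⟩)
        · exact Or.inl h
        · exact Or.inr hw.symm
        · exact Or.inr (he.trans hw).symm
    · rw [if_neg h2]
      constructor
      · exact fun h => Or.inl h
      · rintro (h | ⟨he, -⟩ | ⟨he, -⟩)
        · exact h
        · exact absurd he.symm h2
        · exact absurd he.symm h1

lemma mem_pvAdjv_aux (de : List (Int × Int)) :
    ∀ (d : PySem.Dict Int (PySem.Set Int)) (v w : Int),
    w ∈ (de.foldl (fun d e =>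
        (d.modify e.1 PySem.Set.empty (fun s => s.add e.2)).modify e.2 PySem.Set.empty
          (fun s => s.add e.1)) d).getD v PySem.Set.empty ↔
      w ∈ d.getD v PySem.Set.empty ∨ ∃ e ∈ de, (e.1 = v ∧ e.2 = w) ∨ (e.2 = v ∧ e.1 = w) := by
  induction de with
  | nil => simp
  | cons a t ih =>
    intro d v w
    rw [List.foldl_cons, ih, getD_modify2_mem]
    simp only [List.mem_cons]
    constructor
    · rintro ((h | h) | ⟨e, he, h⟩)
      · exact Or.inl h
      · exact Or.inr ⟨a, Or.inl rfl, h⟩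
      · exact Or.inr ⟨e, Or.inr he, h⟩
    · rintro (h | ⟨e, (rfl | he), h⟩)
      · exact Or.inl (Or.inl h)
      · exact Or.inl (Or.inr h)
      · exact Or.inr ⟨e, he, h⟩

lemma mem_pvAdjv (de : List (Int × Int)) (v w : Int) :
    w ∈ (pvAdjv de).getD v PySem.Set.empty ↔
      ∃ e ∈ de, (e.1 = v ∧ e.2 = w) ∨ (e.2 = v ∧ e.1 = w) := by
  unfold pvAdjv
  rw [mem_pvAdjv_aux]
  have hempty : (PySem.Dict.empty : PySem.Dict Int (PySem.Set Int)).getD v PySem.Set.empty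
      = ([] : List Int) := rfl
  rw [hempty]
  simp

lemma mem_pvPosOf (vl : List Int) (w x : Int) :
    x ∈ (pvPosOf vl).getD w [] ↔
      ∃ k : Nat, ∃ _ : k < vl.length, x = (k : Int) ∧ vl[k] = w := by
  unfold pvPosOf
  have h : (PySem.List.enumerate vl).foldl
      (fun d p => d.modify p.2 [] (fun l => l ++ [p.1])) PySem.Dict.empty
      = ((PySem.List.enumerate vl).map (fun p => (p.2, p.1))).foldl
        (fun d q => d.modify q.1 [] (fun l => l ++ [q.2])) PySem.Dict.empty := by
    rw [List.foldl_map]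
  rw [h, PySem.Dict.getD_foldl_modify_append]
  have hemp : (PySem.Dict.empty : PySem.Dict Int (List Int)).getD w [] = [] := rfl
  rw [hemp, List.nil_append]
  constructor
  · intro hx
    obtain ⟨q, hq, rfl⟩ := List.mem_map.mp hx
    obtain ⟨hq1, hq2⟩ := List.mem_filter.mp hq
    obtain ⟨p, hp, rfl⟩ := List.mem_map.mp hq1
    obtain ⟨k, hk, rfl⟩ := (PySem.List.mem_enumerate_iff vl 0 p).mp hp
    refine ⟨k, hk, by simp, ?_⟩
    simpa using hq2
  · rintro ⟨k, hk, rfl, hw⟩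
    refine List.mem_map.mpr ⟨(vl[k], (0 : Int) + k), ?_, by simp⟩
    refine List.mem_filter.mpr ⟨?_, by simpa using hw⟩
    exact List.mem_map.mpr ⟨((0 : Int) + k, vl[k]),
      (PySem.List.mem_enumerate_iff vl 0 _).mpr ⟨k, hk, rfl⟩, rfl⟩

lemma mem_foldl_update {α : Type} (s : List α) (g : α → List Int)
    (init : PySem.Set Int) (x : Int) :
    x ∈ s.foldl (fun n w => PySem.Set.update n (g w)) init ↔
      x ∈ init ∨ ∃ w ∈ s, x ∈ g w := by
  induction s generalizing init with
  | nil => simp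
  | cons a t ih =>
    rw [List.foldl_cons, ih, PySem.Set.mem_update]
    simp only [List.mem_cons]
    constructor
    · rintro ((h | h) | ⟨w, hw, hx⟩)
      · exact Or.inl h
      · exact Or.inr ⟨a, Or.inl rfl, h⟩
      · exact Or.inr ⟨w, Or.inr hw, hx⟩
    · rintro (h | ⟨w, (rfl | hw), hx⟩)
      · exact Or.inl (Or.inl h)
      · exact Or.inl (Or.inr hx)
      · exact Or.inr ⟨w, hw, hx⟩

lemma nodup_update (xs : List Int) (s : PySem.Set Int) (h : s.Nodup) :
    (PySem.Set.update s xs).Nodup := by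
  unfold PySem.Set.update
  induction xs generalizing s with
  | nil => exact h
  | cons a t ih => exact ih _ (PySem.Set.nodup_add s a h)

lemma nodup_foldl_update {α : Type} (s : List α) (g : α → List Int)
    (init : PySem.Set Int) (h : init.Nodup) :
    (s.foldl (fun n w => PySem.Set.update n (g w)) init).Nodup := by
  induction s generalizing init with
  | nil => exact h
  | cons a t ih => exact ih _ (nodup_update _ _ h)

-- adjacency of two vertex values, seen from B's dict and from A's set
lemma pvAdj_iff (de : List (Int × Int)) (a b : Int) :
    b ∈ (pvAdjv de).getD a PySem.Set.empty ↔
      (pvUndirected de).contains (pvNorm a b) = true := by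
  have hc : (pvUndirected de).contains (pvNorm a b) = true ↔
      pvNorm a b ∈ pvUndirected de := by
    unfold PySem.Set.contains
    exact List.contains_iff_mem
  rw [hc, mem_pvAdjv, mem_pvUndirected]
  constructor
  · rintro ⟨e, he, ⟨h1, h2⟩ | ⟨h1, h2⟩⟩
    · exact ⟨e, he, by rw [h1, h2]⟩
    · exact ⟨e, he, by rw [h1, h2, pvNorm_comm]⟩
  · rintro ⟨e, he, h⟩
    rw [pvNorm_eq_iff] at h
    exact ⟨e, he, by tauto⟩

lemma mem_pvPosAdj (de : List (Int × Int)) (vl : List Int) (i x : Int)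
    (h0 : 0 ≤ i) (h1 : i < (vl.length : Int)) :
    x ∈ PySem.List.pyGetD (pvPosAdj de vl) i PySem.Set.empty ↔
      0 ≤ x ∧ x < (vl.length : Int) ∧
        PySem.List.pyGetD vl x 0 ∈ (pvAdjv de).getD (PySem.List.pyGetD vl i 0) PySem.Set.empty := by
  unfold pvPosAdj
  rw [PySem.List.pyGetD_eq_getElem _ _ h0 (by simpa using h1), List.getElem_map,
    PySem.List.pyGetD_eq_getElem _ _ h0 h1, mem_foldl_update]
  simp only [PySem.Set.empty, List.not_mem_nil, false_or]
  constructor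
  · rintro ⟨w, hw, hx⟩
    rw [mem_pvPosOf] at hx
    obtain ⟨k, hk, rfl, hvk⟩ := hx
    refine ⟨by positivity, by exact_mod_cast hk, ?_⟩
    rw [PySem.List.pyGetD_eq_getElem _ _ (by positivity) (by exact_mod_cast hk)]
    simpa [hvk] using hw
  · rintro ⟨hx0, hxn, hmem⟩
    refine ⟨vl[x.toNat], ?_, ?_⟩
    · rwa [PySem.List.pyGetD_eq_getElem _ _ hx0 hxn] at hmem
    · rw [mem_pvPosOf]
      exact ⟨x.toNat, by omega, by omega, rfl⟩

lemma nodup_pvPosAdj (de : List (Int × Int)) (vl : List Int) (i : Int)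
    (h0 : 0 ≤ i) (h1 : i < (vl.length : Int)) :
    (PySem.List.pyGetD (pvPosAdj de vl) i PySem.Set.empty).Nodup := by
  unfold pvPosAdj
  rw [PySem.List.pyGetD_eq_getElem _ _ h0 (by simpa using h1), List.getElem_map]
  exact nodup_foldl_update _ _ _ List.nodup_nil

lemma pyRange_eq_nil {a b : Int} (h : b ≤ a) : PySem.List.pyRange a b = [] := by
  rw [List.eq_nil_iff_forall_not_mem]
  intro x hx
  rw [PySem.List.mem_pyRange_one] at hx
  omega

lemma pairwise_lt_pyRange_aux (m : Nat) : ∀ (a b : Int), (b - a).toNat ≤ m →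
    (PySem.List.pyRange a b).Pairwise (· < ·) := by
  induction m with
  | zero =>
    intro a b h
    rw [pyRange_eq_nil (by omega)]
    exact List.Pairwise.nil
  | succ m ih =>
    intro a b h
    by_cases hab : a < b
    · rw [PySem.List.pyRange_one_cons hab]
      refine List.Pairwise.cons ?_ (ih (a + 1) b (by omega))
      intro x hx
      rw [PySem.List.mem_pyRange_one] at hx
      omega
    · rw [pyRange_eq_nil (by omega)]
      exact List.Pairwise.nil

lemma pairwise_lt_pyRange (a b : Int) : (PySem.List.pyRange a b).Pairwise (· < ·) :=
  pairwise_lt_pyRange_aux (b - a).toNat a b le_rfl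

lemma pairwise_lt_sorted_of_nodup (s : List Int) (h : s.Nodup) :
    (PySem.List.sorted s (fun x => x)).Pairwise (· < ·) := by
  have hnd : (PySem.List.sorted s (fun x => x)).Nodup :=
    ((PySem.List.sorted_perm s (fun x => x) false).nodup_iff).mpr h
  have hle := PySem.List.sorted_pairwise s (fun x => x)
  exact (hle.and hnd).imp (fun h => lt_of_le_of_ne h.1 h.2)

lemma eq_of_pairwise_lt_of_mem_iff (l1 l2 : List Int)
    (h1 : l1.Pairwise (· < ·)) (h2 : l2.Pairwise (· < ·))
    (hm : ∀ x, x ∈ l1 ↔ x ∈ l2) : l1 = l2 := by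
  have hn1 : l1.Nodup := h1.imp (fun h => ne_of_lt h)
  have hn2 : l2.Nodup := h2.imp (fun h => ne_of_lt h)
  have hp : l1.Perm l2 := (List.perm_ext_iff_of_nodup hn1 hn2).mpr hm
  exact List.eq_of_perm_of_sorted (fun a b _ _ hab hba => by omega) h1 h2 hp

lemma foldl_ite_append {α β : Type} (l : List α) (p : α → Prop) [DecidablePred p]
    (g : α → List β) (acc : List β) :
    l.foldl (fun acc x => if p x then acc ++ g x else acc) acc
      = acc ++ (l.filter (fun x => decide (p x))).flatMap g := by
  induction l generalizing acc with
  | nil => simp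
  | cons a t ih =>
    rw [List.foldl_cons]
    by_cases h : p a
    · rw [if_pos h, ih, List.filter_cons_of_pos (by simpa using h), List.flatMap_cons,
        List.append_assoc]
    · rw [if_neg h, ih, List.filter_cons_of_neg (by simpa using h)]

lemma flatMap_eq_filter_flatMap {α β : Type} (l : List α) (p : α → Bool) (g : α → List β)
    (h : ∀ j ∈ l, p j = false → g j = []) :
    l.flatMap g = (l.filter p).flatMap g := by
  induction l with
  | nil => rfl
  | cons a t ih =>
    rw [List.flatMap_cons]
    by_cases hp : p a = true
    · rw [List.filter_cons_of_pos hp, List.flatMap_cons,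
        ih (fun j hj hf => h j (List.mem_cons_of_mem _ hj) hf)]
    · rw [List.filter_cons_of_neg (by simpa using hp),
        h a List.mem_cons_self (by simpa using hp), List.nil_append,
        ih (fun j hj hf => h j (List.mem_cons_of_mem _ hj) hf)]

lemma tris_eq (de : List (Int × Int)) (vl : List Int) :
    pvTrisB de vl = apply_triangular_faces de vl := by
  unfold pvTrisB apply_triangular_faces
  dsimp only
  simp only [PySem.List.foldl_append_if]
  simp only [PySem.List.foldl_append_ite]
  simp only [foldl_ite_append]
  simp only [PySem.List.foldl_append_eq_flatMap]
  simp only [List.nil_append]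
  apply List.flatMap_congr
  intro i hi
  rw [PySem.List.mem_pyRange_one] at hi
  -- drop the non-adjacent j's from A's full range
  rw [flatMap_eq_filter_flatMap (PySem.List.pyRange (i + 1) (vl.length : Int))
    (fun j => (pvUndirected de).contains (pvNorm (PySem.List.pyGetD vl i 0) (PySem.List.pyGetD vl j 0)))
    _ (by
      intro j _ hfalse
      have hall : ∀ k ∈ PySem.List.pyRange (j + 1) (vl.length : Int),
          (((pvUndirected de).contains (pvNorm (PySem.List.pyGetD vl i 0) (PySem.List.pyGetD vl j 0)) &&
            (pvUndirected de).contains (pvNorm (PySem.List.pyGetD vl j 0) (PySem.List.pyGetD vl k 0))) &&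
            (pvUndirected de).contains (pvNorm (PySem.List.pyGetD vl i 0) (PySem.List.pyGetD vl k 0)))
            = false := by
        intro k _
        rw [show (pvUndirected de).contains (pvNorm (PySem.List.pyGetD vl i 0)
          (PySem.List.pyGetD vl j 0)) = false from hfalse]
        simp
      rw [List.filter_congr hall, List.filter_false, List.map_nil])]
  -- the two j-lists coincide
  have hJ : (PySem.List.sorted (PySem.List.pyGetD (pvPosAdj de vl) i PySem.Set.empty)
        (fun x => x)).filter (fun j => decide (j > i))
      = (PySem.List.pyRange (i + 1) (vl.length : Int)).filter
        (fun j => (pvUndirected de).contains (pvNorm (PySem.List.pyGetD vl i 0) (PySem.List.pyGetD vl j 0))) := by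
    apply eq_of_pairwise_lt_of_mem_iff
    · exact (pairwise_lt_sorted_of_nodup _ (nodup_pvPosAdj de vl i hi.1 hi.2)).sublist
        List.filter_sublist
    · exact (pairwise_lt_pyRange _ _).sublist List.filter_sublist
    · intro x
      rw [List.mem_filter, List.mem_filter, PySem.List.mem_sorted,
        mem_pvPosAdj de vl i x hi.1 hi.2, pvAdj_iff, PySem.List.mem_pyRange_one,
        decide_eq_true_iff]
      constructor
      · rintro ⟨⟨h0, h1, hc⟩, hgt⟩
        exact ⟨⟨by omega, h1⟩, hc⟩
      · rintro ⟨⟨h0, h1⟩, hc⟩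
        exact ⟨⟨by omega, h1, hc⟩, by omega⟩
  rw [hJ]
  apply List.flatMap_congr
  intro j hj
  rw [List.mem_filter, PySem.List.mem_pyRange_one] at hj
  obtain ⟨⟨hj0, hj1⟩, hc1⟩ := hj
  congr 1
  -- the two k-lists coincide
  apply eq_of_pairwise_lt_of_mem_iff
  · exact (pairwise_lt_sorted_of_nodup _
      (PySem.Set.nodup_inter _ _ (nodup_pvPosAdj de vl i hi.1 hi.2))).sublist
      List.filter_sublist
  · exact (pairwise_lt_pyRange _ _).sublist List.filter_sublist
  · intro x
    rw [List.mem_filter, List.mem_filter, PySem.List.mem_sorted, PySem.Set.mem_inter,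
      mem_pvPosAdj de vl i x hi.1 hi.2, mem_pvPosAdj de vl j x (by omega) hj1,
      pvAdj_iff, pvAdj_iff, PySem.List.mem_pyRange_one, decide_eq_true_iff, hc1]
    simp only [Bool.true_and, Bool.and_eq_true]
    constructor
    · rintro ⟨⟨⟨h0, h1, hci⟩, ⟨-, -, hcj⟩⟩, hgt⟩
      exact ⟨⟨by omega, h1⟩, hcj, hci⟩
    · rintro ⟨⟨h0, h1⟩, hcj, hci⟩
      exact ⟨⟨⟨by omega, h1, hci⟩, ⟨by omega, h1, hcj⟩⟩, by omega⟩

lemma deg_inner_eq (es : List (Int × Int)) (k : Int)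
    (dA : PySem.Dict (Int × Int) (List Int)) (dB : PySem.Dict (Int × Int) Int)
    (hinv : ∀ e, dB.getD e 0 = ((dA.getD e []).length : Int)) :
    ∀ e, (es.foldl (fun d e => d.modify e 0 (· + 1)) dB).getD e 0
      = (((es.foldl (fun d e' => d.modify e' [] (fun l => l ++ [k])) dA).getD e []).length : Int) := by
  induction es generalizing dA dB with
  | nil => exact hinv
  | cons a t ih =>
    rw [List.foldl_cons, List.foldl_cons]
    refine ih _ _ ?_
    intro e
    rw [PySem.Dict.getD_modify, PySem.Dict.getD_modify]
    split_ifs with h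
    · rw [List.length_append, hinv a]
      simp only [List.length_singleton]
      push_cast
      omega
    · exact hinv e

lemma deg_eq_aux (tris : List (Int × Int × Int)) : ∀ (st : Int)
    (dA : PySem.Dict (Int × Int) (List Int)) (dB : PySem.Dict (Int × Int) Int),
    (∀ e, dB.getD e 0 = ((dA.getD e []).length : Int)) →
    ∀ e, (tris.foldl (fun d t => (pvTriEdges t).foldl (fun d e => d.modify e 0 (· + 1)) d) dB).getD e 0
      = ((((PySem.List.enumerate tris st).foldl (fun d p =>
          (pvTriEdges p.2).foldl (fun d e => d.modify e [] (fun l => l ++ [p.1])) d) dA).getD e []).length : Int) := by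
  induction tris with
  | nil => intro st dA dB hinv e; exact hinv e
  | cons t ts ih =>
    intro st dA dB hinv e
    rw [PySem.List.enumerate_cons, List.foldl_cons, List.foldl_cons]
    exact ih (st + 1) _ _ (deg_inner_eq (pvTriEdges t) st dA dB hinv) e

lemma deg_eq (tris : List (Int × Int × Int)) (e : Int × Int) :
    (pvEdgeDeg tris).getD e 0 = (((pvEdgeToTris tris).getD e []).length : Int) := by
  unfold pvEdgeDeg pvEdgeToTris
  exact deg_eq_aux tris 0 PySem.Dict.empty PySem.Dict.empty (fun e => rfl) e

lemma score_eq (tris : List (Int × Int × Int)) :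
    pvScoreB (pvEdgeDeg tris) tris = pvFaceScore (pvEdgeToTris tris) tris := by
  funext q
  unfold pvScoreB pvFaceScore
  dsimp only
  rw [PySem.List.foldl_add, zero_add]
  exact congrArg List.sum (List.map_congr_left (fun e _ => deg_eq tris e))

lemma nodup_sorted_range (m : Int) (key : Int → Int) :
    (PySem.List.sorted (PySem.List.pyRange 0 m) key).Nodup := by
  refine ((PySem.List.sorted_perm _ _ false).nodup_iff).mpr ?_
  exact (pairwise_lt_pyRange _ _).imp (fun h => ne_of_lt h)

lemma greedy_eq (tris : List (Int × Int × Int)) (l : List Int) (hnd : l.Nodup)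
    (s : List Int) (d : PySem.Dict (Int × Int) Int) (hs : ∀ k ∈ s, k ∉ l) :
    l.foldl (pvStepA tris) (s, d) = l.foldl (pvStepB tris) (s, d) := by
  induction l generalizing s d with
  | nil => rfl
  | cons k t ih =>
    have hks : k ∉ s := fun h => (hs k h) (List.mem_cons_self)
    have hadd : PySem.Set.add s k = s ++ [k] := by
      unfold PySem.Set.add PySem.Set.contains
      rw [if_neg (fun h => hks (List.contains_iff_mem.mp h))]
    have hstep : pvStepA tris (s, d) k = pvStepB tris (s, d) k := by
      unfold pvStepA pvStepB
      dsimp only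
      rw [hadd]
    rw [List.foldl_cons, List.foldl_cons, hstep]
    rcases hnd with - | ⟨hkt, hndt⟩
    have hs' : ∀ k' ∈ (pvStepB tris (s, d) k).1, k' ∉ t := by
      intro k' hk'
      have hshape : (pvStepB tris (s, d) k).1 = s ∨ (pvStepB tris (s, d) k).1 = s ++ [k] := by
        unfold pvStepB
        dsimp only
        split_ifs <;> simp
      rcases hshape with hsh | hsh <;> rw [hsh] at hk'
      · exact fun hm => (hs k' hk') (List.mem_cons_of_mem _ hm)
      · rcases List.mem_append.mp hk' with hm | hm
        · exact fun hmm => (hs k' hm) (List.mem_cons_of_mem _ hmm)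
        · rw [List.mem_singleton.mp hm]
          exact fun hmm => hkt _ hmm rfl
    have := ih hndt (pvStepB tris (s, d) k).1 (pvStepB tris (s, d) k).2 hs'
    simpa using this

-- ===== VERDICT (by name: the statement is the Claim_ definition above) =====
theorem find_sphere_triangulation_spec : Claim_equal_find_sphere_triangulation := by
  intro de vertices _
  unfold Spec_find_sphere_triangulation
  simp only [find_sphere_triangulation, find_sphere_triangulation_alt]
  rw [tris_eq, score_eq]
  conv_rhs => rw [(rfl : ([] : List Int) = PySem.Set.empty)]
  rw [greedy_eq _ _ (nodup_sorted_range _ _) PySem.Set.empty PySem.Dict.empty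
    (by intro k hk; simp [PySem.Set.empty] at hk)]
  rw [PySem.Dict.foldl_insert_getD_add_one_eq_counter]
  rfl
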